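-- pv_equiv track=rewrite | github.com/Maxalexandre12/wordlist | wordlist.py | mesclagens
-- ===== SOURCE A (Python) =====
-- import itertools
--
-- def mesclagens(palavras_chave):
--     merges = set()
--     for r in range(1, len(palavras_chave)+1):
--         for merge in itertools.product(palavras_chave, repeat=r):
--             palavra_mesclada = ''.join(merge)
--             if palavra_mesclada not in palavras_chave:
--                 merges.add(palavra_mesclada)
--     return merges
-- ===== SOURCE B (Python) =====
-- def mesclagens(palavras_chave):
--     # Breadth-first search over DISTINCT concatenations with a global visited
--     # set: each distinct string is expanded at most once, instead of joining
--     # every keyword tuple of every length as itertools.product does.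
--     seen = set()
--     order = []
--     frontier = []
--     for k in palavras_chave:
--         if k not in seen:
--             seen.add(k)
--             order.append(k)
--             frontier.append(k)
--     for _ in range(len(palavras_chave) - 1):
--         nxt = []
--         for p in frontier:
--             for k in palavras_chave:
--                 s = p + k
--                 if s not in seen:
--                     seen.add(s)
--                     order.append(s)
--                     nxt.append(s)
--         frontier = nxt
--     return {s for s in order if s not in palavras_chave}
-- ===== Notes on version B (the rewrite author's own statement) =====
-- stated objective: alternative
-- what changed: Replaces exhaustive enumeration of every keyword tuple of every length (itertools.product per r, joining each tuple) by a breadth-first search over distinct concatenation strings with a global visited set, so each distinct string is generated from already-built prefixes and expanded at most once.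
import Mathlib
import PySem

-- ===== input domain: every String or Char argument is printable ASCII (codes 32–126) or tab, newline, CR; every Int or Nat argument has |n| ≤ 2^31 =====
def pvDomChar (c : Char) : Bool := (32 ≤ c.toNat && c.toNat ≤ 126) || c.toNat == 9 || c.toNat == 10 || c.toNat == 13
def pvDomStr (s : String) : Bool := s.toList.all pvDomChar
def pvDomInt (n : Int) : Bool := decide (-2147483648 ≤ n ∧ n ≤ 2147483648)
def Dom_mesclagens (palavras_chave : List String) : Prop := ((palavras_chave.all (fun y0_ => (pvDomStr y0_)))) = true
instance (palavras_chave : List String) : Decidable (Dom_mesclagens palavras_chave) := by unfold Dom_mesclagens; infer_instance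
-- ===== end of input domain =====

-- B replaces the exhaustive per-length itertools.product enumeration by a breadth-first search
-- over DISTINCT concatenation strings with a global visited set (each distinct string expanded
-- at most once); the returned values are proved equal.

-- ===== PORT A =====
-- itertools.product(xs, repeat=r) in product order (first coordinate varies slowest)
def pvProdRepeat (xs : List String) : Nat → List (List String)
  | 0 => [[]]
  | r+1 => xs.flatMap (fun x => (pvProdRepeat xs r).map (fun t => x :: t))

def mesclagens (palavras_chave : List String) : List String :=
  (PySem.List.pyRange 1 (PySem.List.len palavras_chave + 1) 1).foldl
    (fun merges r =>
      (pvProdRepeat palavras_chave r.toNat).foldl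
        (fun merges merge =>
          let palavra_mesclada := PySem.Str.join "" merge
          if palavras_chave.contains palavra_mesclada then merges
          else PySem.Set.add merges palavra_mesclada)
        merges)
    PySem.Set.empty

-- ===== PORT B =====
-- state st = (seen, order, frontier/nxt); BFS with a global visited set, as in Source B
def mesclagens_alt (palavras_chave : List String) : List String :=
  let st1 := palavras_chave.foldl
    (fun (st : List String × List String × List String) k =>
      if PySem.Set.contains st.1 k then st
      else (PySem.Set.add st.1 k, st.2.1 ++ [k], st.2.2 ++ [k]))
    (PySem.Set.empty, [], [])
  let st2 := (List.range (palavras_chave.length - 1)).foldl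
    (fun (st : List String × List String × List String) _ =>
      st.2.2.foldl
        (fun (st' : List String × List String × List String) p =>
          palavras_chave.foldl
            (fun (st'' : List String × List String × List String) k =>
              if PySem.Set.contains st''.1 (p ++ k) then st''
              else (PySem.Set.add st''.1 (p ++ k), st''.2.1 ++ [p ++ k], st''.2.2 ++ [p ++ k]))
            st')
        (st.1, st.2.1, []))
    st1
  st2.2.1.foldl
    (fun res s => if palavras_chave.contains s then res else PySem.Set.add res s)
    PySem.Set.empty

-- ===== PRECONDITION & SPEC =====
def Spec_mesclagens (palavras_chave : List String) (out : List String) : Prop := out = mesclagens_alt palavras_chave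
instance (palavras_chave : List String) (out : List String) : Decidable (Spec_mesclagens palavras_chave out) := by unfold Spec_mesclagens; infer_instance

-- ===== CLAIM (what is proved, stated in full; the proofs are below) =====
def Claim_equal_mesclagens : Prop := ∀ (palavras_chave : List String), Dom_mesclagens palavras_chave → Spec_mesclagens palavras_chave (mesclagens palavras_chave)

-- ===== LEMMAS AND PROOFS =====

-- the strings of length-(r+1) concatenations, level by level: level 0 = the keywords themselves
def pvLevel (xs : List String) : Nat → List String
  | 0 => xs
  | r+1 => (pvLevel xs r).flatMap (fun p => xs.map (fun k => p ++ k))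

-- one expansion step: every element extended by every keyword
def pvF (pc : List String) (l : List String) : List String :=
  l.flatMap (fun p => pc.map (fun k => p ++ k))

-- the first pc.length full levels, concatenated
def pvJ (pc : List String) (n : Nat) : List String := ((List.range n).map (pvLevel pc)).flatten

-- add a batch of candidate strings to the merge set, skipping keywords (A's inner loop body)
def pvAddAll (pc : List String) (s : List String) (l : List String) : List String :=
  l.foldl (fun res m => if pc.contains m then res else PySem.Set.add res m) s

-- the NEW first occurrences of l relative to seen-list s, in order
def pvNew (s : List String) : List String → List String
  | [] => []
  | x :: l => if s.contains x then pvNew s l else x :: pvNew (s ++ [x]) l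

-- B's visit step on the triple state
def pvStep (st : List String × List String × List String) (x : String) :
    List String × List String × List String :=
  if PySem.Set.contains st.1 x then st
  else (PySem.Set.add st.1 x, st.2.1 ++ [x], st.2.2 ++ [x])

lemma pvJoin_empty_cons (x : String) (t : List String) :
    PySem.Str.join "" (x :: t) = x ++ PySem.Str.join "" t := by
  cases t with
  | nil => simp [PySem.Str.join, PySem.Chars.join_singleton, PySem.Chars.join_nil]
  | cons b l =>
      simp [PySem.Str.join, PySem.Chars.join_cons_cons, String.ofList_append]

lemma pvLevel_swap (xs : List String) : ∀ r : Nat,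
    xs.flatMap (fun x => (pvLevel xs r).map (fun p => x ++ p)) = pvLevel xs (r+1) := by
  intro r
  induction r with
  | zero => rfl
  | succ r ih =>
      show xs.flatMap (fun x => ((pvLevel xs r).flatMap (fun p => xs.map (fun k => p ++ k))).map (fun p => x ++ p)) = _
      calc xs.flatMap (fun x => ((pvLevel xs r).flatMap (fun p => xs.map (fun k => p ++ k))).map (fun p => x ++ p))
          = (xs.flatMap (fun x => (pvLevel xs r).map (fun p => x ++ p))).flatMap
              (fun q => xs.map (fun k => q ++ k)) := by
            simp [List.map_flatMap, List.flatMap_assoc, List.flatMap_map, List.map_map,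
              Function.comp_def, String.append_assoc]
        _ = pvLevel xs (r+2) := by rw [ih]; rfl

lemma pvJoinProd (xs : List String) : ∀ r : Nat,
    (pvProdRepeat xs (r+1)).map (PySem.Str.join "") = pvLevel xs r := by
  intro r
  induction r with
  | zero =>
      show (xs.flatMap (fun x => ([[]] : List (List String)).map (fun t => x :: t))).map
        (PySem.Str.join "") = xs
      simp [List.map_flatMap, PySem.Str.join]
  | succ r ih =>
      show (xs.flatMap (fun x => (pvProdRepeat xs (r+1)).map (fun t => x :: t))).map
        (PySem.Str.join "") = _
      rw [← pvLevel_swap xs r, ← ih]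
      simp [List.map_flatMap, List.map_map, Function.comp_def, pvJoin_empty_cons]

lemma pvInner_eq (pc s : List String) (l : List (List String)) :
    l.foldl (fun merges merge =>
        let palavra_mesclada := PySem.Str.join "" merge
        if pc.contains palavra_mesclada then merges
        else PySem.Set.add merges palavra_mesclada) s
      = pvAddAll pc s (l.map (PySem.Str.join "")) := by
  simp [pvAddAll, List.foldl_map]

lemma pvA_eq (pc : List String) :
    mesclagens pc = (List.range pc.length).foldl
      (fun s k => pvAddAll pc s (pvLevel pc k)) PySem.Set.empty := by
  unfold mesclagens
  rw [PySem.List.pyRange_one]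
  have h1 : ((PySem.List.len pc + 1 - 1)).toNat = pc.length := by
    simp [PySem.List.len]
  rw [h1, List.foldl_map]
  congr 1
  funext s k
  have h2 : ((1 : Int) + (k : Int)).toNat = k + 1 := by omega
  rw [h2, pvInner_eq, pvJoinProd]

lemma pvAddAll_append (pc s l1 l2 : List String) :
    pvAddAll pc s (l1 ++ l2) = pvAddAll pc (pvAddAll pc s l1) l2 := by
  simp [pvAddAll, List.foldl_append]

lemma pvJ_succ (pc : List String) (n : Nat) :
    pvJ pc (n+1) = pvJ pc n ++ pvLevel pc n := by
  simp [pvJ, List.range_succ]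

lemma pvA_flat (pc : List String) :
    mesclagens pc = pvAddAll pc [] (pvJ pc pc.length) := by
  rw [pvA_eq]
  have h : ∀ (n : Nat) (s : List String),
      (List.range n).foldl (fun t k => pvAddAll pc t (pvLevel pc k)) s
        = pvAddAll pc s (pvJ pc n) := by
    intro n
    induction n with
    | zero => intro s; rfl
    | succ n ih =>
        intro s
        rw [List.range_succ, List.foldl_append, List.foldl_cons, List.foldl_nil,
          ih, pvJ_succ, pvAddAll_append]
  exact h pc.length PySem.Set.empty

-- basic facts about pvNew ------------------------------------------------------

lemma pvNew_append : ∀ (l1 l2 s : List String),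
    pvNew s (l1 ++ l2) = pvNew s l1 ++ pvNew (s ++ pvNew s l1) l2 := by
  intro l1
  induction l1 with
  | nil => intro l2 s; simp [pvNew]
  | cons x l ih =>
      intro l2 s
      by_cases h : x ∈ s
      · simp [pvNew, h, ih]
      · rw [List.cons_append,
          show pvNew s (x :: (l ++ l2)) = x :: pvNew (s ++ [x]) (l ++ l2) by simp [pvNew, h],
          show pvNew s (x :: l) = x :: pvNew (s ++ [x]) l by simp [pvNew, h],
          ih]
        simp [List.append_assoc]

lemma mem_pvNew : ∀ (l s : List String) (x : String),
    x ∈ s ++ pvNew s l ↔ x ∈ s ∨ x ∈ l := by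
  intro l
  induction l with
  | nil => intro s x; simp [pvNew]
  | cons y l ih =>
      intro s x
      by_cases h : y ∈ s
      · have hy : y ∈ s := h
        rw [show pvNew s (y :: l) = pvNew s l by simp [pvNew, h], ih]
        constructor
        · rintro (h1 | h1)
          · exact Or.inl h1
          · exact Or.inr (List.mem_cons_of_mem _ h1)
        · rintro (h1 | h1)
          · exact Or.inl h1
          · rcases List.mem_cons.mp h1 with h2 | h2
            · exact Or.inl (h2 ▸ hy)
            · exact Or.inr h2
      · rw [show pvNew s (y :: l) = y :: pvNew (s ++ [y]) l by simp [pvNew, h],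
          show s ++ y :: pvNew (s ++ [y]) l = (s ++ [y]) ++ pvNew (s ++ [y]) l by simp,
          ih]
        simp [List.mem_append, List.mem_cons, or_assoc]

lemma pvNew_nil_of_subset : ∀ (l s : List String), (∀ x ∈ l, x ∈ s) → pvNew s l = [] := by
  intro l
  induction l with
  | nil => intro s _; rfl
  | cons x l ih =>
      intro s h
      have hx : x ∈ s := h x (by simp)
      simp only [pvNew, List.contains_iff_mem.mpr hx, if_true]
      exact ih s (fun y hy => h y (List.mem_cons_of_mem _ hy))

lemma pvNew_nodup_append : ∀ (l s : List String), s.Nodup → (s ++ pvNew s l).Nodup := by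
  intro l
  induction l with
  | nil => intro s hs; simpa [pvNew] using hs
  | cons x l ih =>
      intro s hs
      by_cases h : x ∈ s
      · simpa [pvNew, h] using ih s hs
      · have hx : x ∉ s := h
        have hsx : (s ++ [x]).Nodup := by
          have hd : ∀ a ∈ s, ∀ b ∈ [x], a ≠ b := by
            intro a ha b hb
            rw [List.mem_singleton] at hb
            subst hb
            intro h'
            exact hx (h' ▸ ha)
          exact List.nodup_append.mpr ⟨hs, List.nodup_singleton x, hd⟩
        rw [show pvNew s (x :: l) = x :: pvNew (s ++ [x]) l by simp [pvNew, h],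
          show s ++ x :: pvNew (s ++ [x]) l = (s ++ [x]) ++ pvNew (s ++ [x]) l by simp]
        exact ih _ hsx

lemma pvNew_eq_self : ∀ (l s : List String), (∀ x ∈ l, x ∉ s) → l.Nodup → pvNew s l = l := by
  intro l
  induction l with
  | nil => intro s _ _; rfl
  | cons x l ih =>
      intro s h hn
      have hx : s.contains x = false := by
        simpa using h x (by simp)
      simp only [pvNew, hx, Bool.false_eq_true, if_false, List.cons.injEq, true_and]
      refine ih (s ++ [x]) ?_ hn.of_cons
      intro y hy
      simp only [List.mem_append, List.mem_singleton]
      rintro (h1 | h1)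
      · exact h y (List.mem_cons_of_mem _ hy) h1
      · exact (List.nodup_cons.mp hn).1 (h1 ▸ hy)

lemma pvNew_filter (Q : String → Bool) : ∀ (l s : List String),
    (pvNew s l).filter Q = pvNew (s.filter Q) (l.filter Q) := by
  intro l
  induction l with
  | nil => intro s; rfl
  | cons x l ih =>
      intro s
      by_cases hs : x ∈ s
      · by_cases hq : Q x
        · have hmf : x ∈ s.filter Q := List.mem_filter.mpr ⟨hs, hq⟩
          simp [pvNew, hs, hq, hmf, ih]
        · simp [pvNew, hs, hq, ih]
      · by_cases hq : Q x
        · have h1 : x ∉ s.filter Q := fun hc => hs (List.mem_filter.mp hc).1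
          have h2 : (s ++ [x]).filter Q = s.filter Q ++ [x] := by
            simp [List.filter_append, hq]
          simp [pvNew, hs, hq, h1, ih, h2]
        · have h2 : (s ++ [x]).filter Q = s.filter Q := by
            simp [List.filter_append, hq]
          simp [pvNew, hs, hq, ih, h2]

lemma pvAddAll_eq_new (pc : List String) : ∀ (l s : List String),
    pvAddAll pc s l = s ++ pvNew s (l.filter (fun m => !pc.contains m)) := by
  intro l
  induction l with
  | nil => intro s; simp [pvAddAll, pvNew]
  | cons m l ih =>
      intro s
      by_cases hp : m ∈ pc
      · rw [show pvAddAll pc s (m :: l) = pvAddAll pc s l by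
            simp [pvAddAll, List.foldl_cons, hp],
          ih, List.filter_cons]
        simp [hp]
      · by_cases hs : m ∈ s
        · have ha : PySem.Set.add s m = s := by
            simp [PySem.Set.add, PySem.Set.contains, hs]
          rw [show pvAddAll pc s (m :: l) = pvAddAll pc (PySem.Set.add s m) l by
              simp [pvAddAll, List.foldl_cons, hp],
            ha, ih, List.filter_cons]
          simp [hp, pvNew, hs]
        · have ha : PySem.Set.add s m = s ++ [m] := by
            simp [PySem.Set.add, PySem.Set.contains, hs]
          rw [show pvAddAll pc s (m :: l) = pvAddAll pc (PySem.Set.add s m) l by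
              simp [pvAddAll, List.foldl_cons, hp],
            ha, ih, List.filter_cons]
          simp [hp, pvNew, hs, List.append_assoc]

-- the central BFS lemma: expanding only the NEW elements of l produces the same new strings
lemma pvKey (pc : List String) : ∀ (l s t : List String),
    (∀ x ∈ s, ∀ k ∈ pc, (x ++ k) ∈ t) →
    pvNew t (pvF pc l) = pvNew t (pvF pc (pvNew s l)) := by
  intro l
  induction l with
  | nil => intro s t _; rfl
  | cons x l ih =>
      intro s t h
      have hblk : pvF pc (x :: l) = pc.map (fun k => x ++ k) ++ pvF pc l := by
        simp [pvF]
      by_cases hx : x ∈ s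
      · have hxs : x ∈ s := hx
        have hsub : pvNew t (pc.map (fun k => x ++ k)) = [] := by
          refine pvNew_nil_of_subset _ _ ?_
          intro y hy
          rcases List.mem_map.mp hy with ⟨k, hk, rfl⟩
          exact h x hxs k hk
        rw [hblk, pvNew_append, hsub]
        simp only [List.nil_append, List.append_nil]
        rw [show pvNew s (x :: l) = pvNew s l by simp [pvNew, hx]]
        exact ih s t h
      · rw [show pvNew s (x :: l) = x :: pvNew (s ++ [x]) l by simp [pvNew, hx]]
        have hblk2 : pvF pc (x :: pvNew (s ++ [x]) l)
            = pc.map (fun k => x ++ k) ++ pvF pc (pvNew (s ++ [x]) l) := by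
          simp [pvF]
        rw [hblk, hblk2, pvNew_append, pvNew_append]
        congr 1
        refine ih (s ++ [x]) (t ++ pvNew t (pc.map (fun k => x ++ k))) ?_
        intro y hy k hk
        rcases List.mem_append.mp hy with h1 | h1
        · exact List.mem_append_left _ (h y h1 k hk)
        · have h2 : y = x := List.mem_singleton.mp h1
          subst h2
          rw [mem_pvNew]
          exact Or.inr (List.mem_map.mpr ⟨k, hk, rfl⟩)

lemma mem_pvLevel_succ (pc : List String) (j : Nat) (x k : String)
    (hx : x ∈ pvLevel pc j) (hk : k ∈ pc) : x ++ k ∈ pvLevel pc (j+1) := by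
  show x ++ k ∈ (pvLevel pc j).flatMap (fun p => pc.map (fun k => p ++ k))
  rw [List.mem_flatMap]
  exact ⟨x, hx, List.mem_map.mpr ⟨k, hk, rfl⟩⟩

lemma mem_pvJ (pc : List String) (n : Nat) (x : String) :
    x ∈ pvJ pc n ↔ ∃ j, j < n ∧ x ∈ pvLevel pc j := by
  simp only [pvJ, List.mem_flatten, List.mem_map, List.mem_range]
  constructor
  · rintro ⟨l, ⟨j, hj, rfl⟩, hx⟩
    exact ⟨j, hj, hx⟩
  · rintro ⟨j, hj, hx⟩
    exact ⟨pvLevel pc j, ⟨j, hj, rfl⟩, hx⟩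

-- B's fold of the visit step over a list of candidates
lemma foldl_pvStep : ∀ (l s o f : List String),
    l.foldl pvStep (s, o, f) = (s ++ pvNew s l, o ++ pvNew s l, f ++ pvNew s l) := by
  intro l
  induction l with
  | nil => intro s o f; simp [pvNew]
  | cons x l ih =>
      intro s o f
      by_cases h : x ∈ s
      · have hstep : pvStep (s, o, f) x = (s, o, f) := by
          simp [pvStep, PySem.Set.contains, h]
        rw [List.foldl_cons, hstep, ih]
        simp [pvNew, h]
      · have hstep : pvStep (s, o, f) x = (s ++ [x], o ++ [x], f ++ [x]) := by
          simp [pvStep, PySem.Set.contains, PySem.Set.add, h]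
        rw [List.foldl_cons, hstep, ih]
        simp [pvNew, h]

-- the double loop of a round is the fold of pvStep over pvF of the frontier
lemma pvRound_inner (pc : List String) (fr : List String)
    (st : List String × List String × List String) :
    fr.foldl (fun st' p => pc.foldl (fun st'' k => pvStep st'' (p ++ k)) st') st
      = (pvF pc fr).foldl pvStep st := by
  unfold pvF
  rw [List.foldl_flatMap]
  congr 1
  funext b p
  simp only [List.foldl_map]

-- the invariant carried through the rounds
lemma pvRounds (pc : List String) : ∀ (m i : Nat) (fr : List String),
    pvNew (pvNew [] (pvJ pc (i+1))) (pvF pc fr)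
      = pvNew (pvNew [] (pvJ pc (i+1))) (pvLevel pc (i+1)) →
    ∃ fr', (List.range m).foldl
        (fun st _ => (pvF pc st.2.2).foldl pvStep (st.1, st.2.1, ([] : List String)))
        (pvNew [] (pvJ pc (i+1)), pvNew [] (pvJ pc (i+1)), fr)
      = (pvNew [] (pvJ pc (i+m+1)), pvNew [] (pvJ pc (i+m+1)), fr') := by
  intro m
  induction m with
  | zero => intro i fr _; exact ⟨fr, rfl⟩
  | succ m ih =>
      intro i fr hfr
      rw [List.range_succ_eq_map, List.foldl_cons, List.foldl_map]
      have hS : pvNew [] (pvJ pc (i+1)) ++ pvNew (pvNew [] (pvJ pc (i+1))) (pvLevel pc (i+1))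
          = pvNew [] (pvJ pc (i+1+1)) := by
        rw [pvJ_succ pc (i+1), pvNew_append]
        simp
      have hone : (pvF pc fr).foldl pvStep
            (pvNew [] (pvJ pc (i+1)), pvNew [] (pvJ pc (i+1)), ([] : List String))
          = (pvNew [] (pvJ pc (i+1+1)), pvNew [] (pvJ pc (i+1+1)),
             pvNew (pvNew [] (pvJ pc (i+1))) (pvLevel pc (i+1))) := by
        rw [foldl_pvStep, hfr, hS]
        simp
      rw [hone]
      have harg : ∀ x ∈ pvNew [] (pvJ pc (i+1)), ∀ k ∈ pc,
          x ++ k ∈ pvNew [] (pvJ pc (i+1+1)) := by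
        intro x hx k hk
        have hx2 : x ∈ pvJ pc (i+1) := by
          have h3 := (mem_pvNew (pvJ pc (i+1)) [] x).mp (by simpa using hx)
          simpa using h3
        rcases (mem_pvJ pc (i+1) x).mp hx2 with ⟨j, hj, hxl⟩
        have hmem : x ++ k ∈ pvJ pc (i+1+1) :=
          (mem_pvJ pc (i+2) (x ++ k)).mpr ⟨j+1, by omega, mem_pvLevel_succ pc j x k hxl hk⟩
        have h4 := (mem_pvNew (pvJ pc (i+1+1)) [] (x ++ k)).mpr (Or.inr hmem)
        simpa using h4
      have hnext : pvNew (pvNew [] (pvJ pc (i+1+1)))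
            (pvF pc (pvNew (pvNew [] (pvJ pc (i+1))) (pvLevel pc (i+1))))
          = pvNew (pvNew [] (pvJ pc (i+1+1))) (pvLevel pc (i+1+1)) := by
        have hkey := pvKey pc (pvLevel pc (i+1)) (pvNew [] (pvJ pc (i+1)))
          (pvNew [] (pvJ pc (i+1+1))) harg
        rw [← hkey]
        rfl
      obtain ⟨fr', hfr'⟩ := ih (i+1) _ hnext
      refine ⟨fr', ?_⟩
      rw [show i + (m+1) + 1 = i + 1 + m + 1 by omega]
      exact hfr'

lemma pvJ_one (pc : List String) : pvJ pc 1 = pc := by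
  simp [pvJ, List.range_succ, pvLevel]

lemma pvB_flat (pc : List String) :
    mesclagens_alt pc = pvAddAll pc [] (pvNew [] (pvJ pc pc.length)) := by
  cases pc with
  | nil => rfl
  | cons a l =>
      show ((List.range ((a :: l).length - 1)).foldl
          (fun st _ => st.2.2.foldl
            (fun st' p => (a :: l).foldl (fun st'' k => pvStep st'' (p ++ k)) st')
            (st.1, st.2.1, []))
          ((a :: l).foldl pvStep (PySem.Set.empty, [], []))).2.1.foldl
          (fun res s => if (a :: l).contains s then res else PySem.Set.add res s)
          PySem.Set.empty
        = pvAddAll (a :: l) [] (pvNew [] (pvJ (a :: l) (a :: l).length))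
      have hinner : (fun (st : List String × List String × List String) (_ : Nat) =>
            st.2.2.foldl
              (fun st' p => (a :: l).foldl (fun st'' k => pvStep st'' (p ++ k)) st')
              (st.1, st.2.1, []))
          = (fun st _ => (pvF (a :: l) st.2.2).foldl pvStep (st.1, st.2.1, ([] : List String))) := by
        funext st j
        exact pvRound_inner (a :: l) st.2.2 (st.1, st.2.1, [])
      have hst1 : (a :: l).foldl pvStep (PySem.Set.empty, [], [])
          = (pvNew [] (pvJ (a :: l) 1), pvNew [] (pvJ (a :: l) 1), pvNew [] (pvJ (a :: l) 1)) := by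
        rw [foldl_pvStep, pvJ_one]
        rfl
      have hbase : pvNew (pvNew [] (pvJ (a :: l) 1)) (pvF (a :: l) (pvNew [] (pvJ (a :: l) 1)))
          = pvNew (pvNew [] (pvJ (a :: l) 1)) (pvLevel (a :: l) 1) := by
        rw [pvJ_one]
        have hkey := pvKey (a :: l) (a :: l) [] (pvNew [] (a :: l)) (by intro x hx; simp at hx)
        rw [← hkey]
        rfl
      rw [hinner, hst1]
      rcases pvRounds (a :: l) ((a :: l).length - 1) 0 _ hbase with ⟨fr', hfr'⟩
      rw [hfr']
      have hn : 0 + ((a :: l).length - 1) + 1 = (a :: l).length := by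
        simp only [List.length_cons]
        omega
      rw [hn]
      rfl

-- ===== VERDICT (by name: the statement is the Claim_ definition above) =====
theorem mesclagens_spec : Claim_equal_mesclagens := by
  intro pc _
  show mesclagens pc = mesclagens_alt pc
  rw [pvA_flat, pvB_flat, pvAddAll_eq_new, pvAddAll_eq_new]
  have hnodup : (pvNew [] (pvJ pc pc.length)).Nodup := by
    simpa using pvNew_nodup_append (pvJ pc pc.length) [] List.nodup_nil
  have hfilter : ((pvNew [] (pvJ pc pc.length)).filter (fun m => !pc.contains m)).Nodup :=
    hnodup.filter _
  rw [pvNew_eq_self _ [] (by intro x _; simp) hfilter]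
  rw [pvNew_filter]
  simp
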